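-- pv_equiv track=rewrite | github.com/adolfoarmas/notification_api | src/notifications/service.py | extract_channel_groups
-- ===== SOURCE A (Python) =====
-- from typing import List, Tuple, Any, Generator
--
-- def extract_channel_groups(users_and_channels: List[Tuple[Any, Any, int]]) -> Generator[Tuple[int, List[Tuple[Any, Any]]], None, None]:
--
--     if not users_and_channels:
--         return
--
--     current_group = []
--     current_last_element = users_and_channels[0][2]
--
--     for item in users_and_channels:
--         if item[2] == current_last_element:
--             current_group.append(item[:-1])
--         else:
--             yield (current_last_element, current_group)
--             current_group = [item[:-1]]
--             current_last_element = item[2]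
--
--     if current_group:
--         yield (current_last_element, current_group)
-- ===== SOURCE B (Python) =====
-- def extract_channel_groups(users_and_channels):
--     rest = users_and_channels
--     while rest:
--         key = rest[0][2]
--         j = 0
--         while j < len(rest) and rest[j][2] == key:
--             j += 1
--         yield (key, [t[:-1] for t in rest[:j]])
--         rest = rest[j:]
-- ===== Notes on version B (the rewrite author's own statement) =====
-- stated objective: idiomatic
-- what changed: Replaced A's single-pass accumulator state machine (current_group/current_last_element with end-of-loop flush) by a span-based scan that, for each run, finds the extent of the consecutive equal-key block and emits it at once, then continues past it.
import Mathlib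
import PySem

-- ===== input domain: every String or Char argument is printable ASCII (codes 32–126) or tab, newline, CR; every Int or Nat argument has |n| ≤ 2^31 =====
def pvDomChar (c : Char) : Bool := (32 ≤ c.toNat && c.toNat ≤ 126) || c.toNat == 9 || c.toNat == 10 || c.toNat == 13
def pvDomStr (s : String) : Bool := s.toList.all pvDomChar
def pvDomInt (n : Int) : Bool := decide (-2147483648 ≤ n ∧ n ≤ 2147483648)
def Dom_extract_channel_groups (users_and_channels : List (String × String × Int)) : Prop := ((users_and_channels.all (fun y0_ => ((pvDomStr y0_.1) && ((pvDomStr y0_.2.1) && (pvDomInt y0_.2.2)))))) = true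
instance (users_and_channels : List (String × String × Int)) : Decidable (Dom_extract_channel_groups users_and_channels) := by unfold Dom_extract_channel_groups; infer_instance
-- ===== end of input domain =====

-- ===== PORT A =====
-- A: generator with accumulator state (current_group, current_last_element); equivalence is about
-- the list of yielded values.
def pvLoopA (xs : List (String × String × Int)) (current_group : List (String × String))
    (current_last_element : Int) : List (Int × (List (String × String))) :=
  match xs with
  | [] => if current_group ≠ [] then [(current_last_element, current_group)] else []
  | item :: rest =>
      if item.2.2 = current_last_element then
        pvLoopA rest (current_group ++ [(item.1, item.2.1)]) current_last_element
      else
        (current_last_element, current_group) ::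
          pvLoopA rest [(item.1, item.2.1)] item.2.2

def extract_channel_groups (users_and_channels : List (String × String × Int)) : List (Int × (List (String × String))) :=
  match users_and_channels with
  | [] => []
  | first :: _ => pvLoopA users_and_channels [] first.2.2

-- ===== PORT B =====
-- B: span-based scan — take the run of the head's key (rest[:j]), emit it, recurse on rest[j:].
def extract_channel_groups_alt (users_and_channels : List (String × String × Int)) : List (Int × (List (String × String))) :=
  match users_and_channels with
  | [] => []
  | first :: rest =>
      let key := first.2.2
      let run := (first :: rest).takeWhile (fun t => t.2.2 == key)
      (key, run.map (fun t => (t.1, t.2.1))) ::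
        extract_channel_groups_alt ((first :: rest).dropWhile (fun t => t.2.2 == key))
termination_by users_and_channels.length
decreasing_by
  simp only [List.dropWhile, beq_self_eq_true]
  exact Nat.lt_succ_of_le (List.length_dropWhile_le _ _)
-- ===== PRECONDITION & SPEC =====
def Spec_extract_channel_groups (users_and_channels : List (String × String × Int)) (out : List (Int × (List (String × String)))) : Prop := out = extract_channel_groups_alt users_and_channels
instance (users_and_channels : List (String × String × Int)) (out : List (Int × (List (String × String)))) : Decidable (Spec_extract_channel_groups users_and_channels out) := by unfold Spec_extract_channel_groups; infer_instance

-- ===== CLAIM (what is proved, stated in full; the proofs are below) =====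
def Claim_equal_extract_channel_groups : Prop := ∀ (users_and_channels : List (String × String × Int)), Dom_extract_channel_groups users_and_channels → Spec_extract_channel_groups users_and_channels (extract_channel_groups users_and_channels)

-- ===== LEMMAS AND PROOFS =====
theorem pvLoopA_eq (xs : List (String × String × Int)) :
    ∀ (g : List (String × String)) (k : Int), g ≠ [] →
    pvLoopA xs g k =
      (k, g ++ (xs.takeWhile (fun t => t.2.2 == k)).map (fun t => (t.1, t.2.1))) ::
        extract_channel_groups_alt (xs.dropWhile (fun t => t.2.2 == k)) := by
  induction xs with
  | nil =>
      intro g k hg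
      simp [pvLoopA, extract_channel_groups_alt, hg]
  | cons item rest ih =>
      intro g k hg
      by_cases h : item.2.2 = k
      · have h' : (fun t : String × String × Int => t.2.2 == k) item = true := by
          simp [h]
        rw [pvLoopA, if_pos h, ih _ k (by simp),
          List.takeWhile_cons_of_pos (p := fun t : String × String × Int => t.2.2 == k)
            (a := item) (l := rest) h',
          List.dropWhile_cons_of_pos (p := fun t : String × String × Int => t.2.2 == k)
            (a := item) (l := rest) h']
        simp
      · have h' : (fun t : String × String × Int => t.2.2 == k) item = false := by
          simp [h]
        rw [pvLoopA, if_neg h, ih _ item.2.2 (by simp), List.takeWhile_cons_of_neg (by simp [h']),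
          List.dropWhile_cons_of_neg (by simp [h'])]
        rw [extract_channel_groups_alt]
        simp [List.takeWhile_cons_of_pos, List.dropWhile_cons_of_pos]

-- ===== VERDICT (by name: the statement is the Claim_ definition above) =====
theorem extract_channel_groups_spec : Claim_equal_extract_channel_groups := by
  unfold Claim_equal_extract_channel_groups Spec_extract_channel_groups
  intro xs _
  cases xs with
  | nil => simp [extract_channel_groups, extract_channel_groups_alt]
  | cons first rest =>
      rw [extract_channel_groups]
      rw [pvLoopA, if_pos rfl]
      simp only [List.nil_append]
      rw [pvLoopA_eq rest [(first.1, first.2.1)] first.2.2 (by simp)]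
      rw [extract_channel_groups_alt]
      simp [List.takeWhile_cons_of_pos, List.dropWhile_cons_of_pos]
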